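-- pv_equiv track=rewrite | github.com/Mounikakotipalli/codemind-python | Airport__authority.py | weightMachine
-- ===== SOURCE A (Python) =====
-- def weightMachine(N, weights, T):
--     base_amount = 1
--     # Base amount to be paid
--     total_amount = 0
--     # Total amount to be paid
--     # Iterate through the array of weights
--     for weight in weights:
--         if weight > T:
--             total_amount += 2 * base_amount
--     # Double the base amount
--         else:
--             total_amount += base_amount
--     return total_amount
-- ===== SOURCE B (Python) =====
-- def weightMachine(N, weights, T):
--     # Sort, then binary-search the first index whose weight exceeds T:
--     # every parcel pays base 1, and the suffix past the split pays 1 extra.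
--     ws = sorted(weights)
--     lo, hi = 0, len(ws)
--     while lo < hi:
--         mid = (lo + hi) // 2
--         if ws[mid] <= T:
--             lo = mid + 1
--         else:
--             hi = mid
--     return 2 * len(ws) - lo
-- ===== Notes on version B (the rewrite author's own statement) =====
-- stated objective: alternative
-- what changed: Instead of a per-element branch-and-accumulate pass, B sorts the weights and binary-searches the split point between weights <= T and weights > T, returning 2*len - split in closed form.
import Mathlib
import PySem

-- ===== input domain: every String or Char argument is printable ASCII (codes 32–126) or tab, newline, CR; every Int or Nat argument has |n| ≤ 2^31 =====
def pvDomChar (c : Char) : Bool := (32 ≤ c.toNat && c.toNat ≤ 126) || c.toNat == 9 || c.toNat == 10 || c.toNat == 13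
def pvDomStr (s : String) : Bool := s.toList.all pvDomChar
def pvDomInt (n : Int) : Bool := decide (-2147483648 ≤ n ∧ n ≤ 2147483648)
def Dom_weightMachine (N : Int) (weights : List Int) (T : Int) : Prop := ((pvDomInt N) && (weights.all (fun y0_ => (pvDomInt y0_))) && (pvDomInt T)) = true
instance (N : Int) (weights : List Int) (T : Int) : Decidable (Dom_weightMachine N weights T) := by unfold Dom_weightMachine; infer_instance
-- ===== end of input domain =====

-- B replaces the per-element branch-and-accumulate pass with sort + binary search for the
-- split point between weights <= T and weights > T (alternative algorithm).


-- ===== PORT A =====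
def weightMachine (N : Int) (weights : List Int) (T : Int) : Int :=
  let base_amount : Int := 1
  let total_amount : Int := 0
  weights.foldl (fun total_amount weight =>
    if weight > T then total_amount + 2 * base_amount else total_amount + base_amount) total_amount

-- ===== PORT B =====
-- The while loop of Source B: lo, hi are list indices, provably nonnegative in Python, so Nat;
-- (lo+hi)/2 on Nat equals Python's (lo+hi)//2 on nonnegative ints; ws[mid] is in range
-- (lo ≤ mid < hi ≤ len), so getD is exact there.
def weightMachineSearch (ws : List Int) (T : Int) (lo hi : Nat) : Nat :=
  if lo < hi then
    let mid := (lo + hi) / 2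
    if ws.getD mid 0 ≤ T then weightMachineSearch ws T (mid + 1) hi
    else weightMachineSearch ws T lo mid
  else lo
termination_by hi - lo
decreasing_by all_goals omega

def weightMachine_alt (N : Int) (weights : List Int) (T : Int) : Int :=
  let ws := PySem.List.sorted weights (fun x => x) false
  2 * (ws.length : Int) - (weightMachineSearch ws T 0 ws.length : Int)

-- ===== PRECONDITION & SPEC =====
def Spec_weightMachine (N : Int) (weights : List Int) (T : Int) (out : Int) : Prop := out = weightMachine_alt N weights T
instance (N : Int) (weights : List Int) (T : Int) (out : Int) : Decidable (Spec_weightMachine N weights T out) := by unfold Spec_weightMachine; infer_instance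

-- ===== CLAIM =====
def Claim_equal_weightMachine : Prop := ∀ (N : Int) (weights : List Int) (T : Int), Dom_weightMachine N weights T → Spec_weightMachine N weights T (weightMachine N weights T)

-- ===== LEMMAS AND PROOFS =====

-- On a sorted list, a witness ws[mid] ≤ T pushes the count of elements ≤ T above mid.
theorem filter_le_length_ge (ws : List Int) (T : Int)
    (hpw : ws.Pairwise (fun a b => a ≤ b)) (mid : Nat) (hm : mid < ws.length)
    (hle : ws[mid] ≤ T) :
    mid + 1 ≤ ((ws.filter (fun w => decide (w ≤ T))).length) := by
  have hmono := List.pairwise_iff_getElem.mp hpw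
  have hsplit : ws = ws.take (mid + 1) ++ ws.drop (mid + 1) := (List.take_append_drop _ _).symm
  have htake : (ws.take (mid + 1)).filter (fun w => decide (w ≤ T)) = ws.take (mid + 1) := by
    apply List.filter_eq_self.mpr
    intro x hx
    obtain ⟨i, hi, hxe⟩ := List.getElem_of_mem hx
    have hi' : i < mid + 1 := lt_of_lt_of_le hi (by simp [List.length_take])
    have : (ws.take (mid + 1))[i] = ws[i]'(by omega) := List.getElem_take
    rw [this] at hxe
    rcases Nat.lt_or_ge i mid with h | h
    · have := hmono i mid (by omega) hm h
      simp only [decide_eq_true_eq]; omega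
    · have : i = mid := by omega
      subst this; simp only [decide_eq_true_eq]; omega
  calc mid + 1 = (ws.take (mid + 1)).length := by simp [List.length_take]; omega
    _ = ((ws.take (mid + 1)).filter (fun w => decide (w ≤ T))).length := by rw [htake]
    _ ≤ ((ws.filter (fun w => decide (w ≤ T))).length) := by
        conv_rhs => rw [hsplit]
        rw [List.filter_append, List.length_append]; omega

-- On a sorted list, a witness T < ws[mid] caps the count of elements ≤ T at mid.
theorem filter_le_length_le (ws : List Int) (T : Int)
    (hpw : ws.Pairwise (fun a b => a ≤ b)) (mid : Nat) (hm : mid < ws.length)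
    (hgt : T < ws[mid]) :
    ((ws.filter (fun w => decide (w ≤ T))).length) ≤ mid := by
  have hmono := List.pairwise_iff_getElem.mp hpw
  have hsplit : ws = ws.take mid ++ ws.drop mid := (List.take_append_drop _ _).symm
  have hdrop : (ws.drop mid).filter (fun w => decide (w ≤ T)) = [] := by
    apply List.filter_eq_nil_iff.mpr
    intro x hx
    obtain ⟨i, hi, hxe⟩ := List.getElem_of_mem hx
    have hlen : mid + i < ws.length := by
      have := List.length_drop (l := ws) (i := mid); omega
    have : (ws.drop mid)[i] = ws[mid + i]'hlen := List.getElem_drop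
    rw [this] at hxe
    have hge : ws[mid] ≤ ws[mid + i]'hlen := by
      rcases Nat.eq_zero_or_pos i with h0 | h0
      · subst h0; simp
      · exact hmono mid (mid + i) hm hlen (by omega)
    simp only [decide_eq_true_eq]; omega
  calc ((ws.filter (fun w => decide (w ≤ T))).length)
      = ((ws.take mid).filter (fun w => decide (w ≤ T))).length
        + ((ws.drop mid).filter (fun w => decide (w ≤ T))).length := by
        conv_lhs => rw [hsplit]
        rw [List.filter_append, List.length_append]
    _ ≤ (ws.take mid).length + 0 := by
        rw [hdrop]; simp only [List.length_nil, Nat.add_zero]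
        exact List.length_filter_le _ _
    _ ≤ mid := by simp [List.length_take]

-- The binary search converges to the count of elements ≤ T, on a sorted list.
theorem search_eq_count (ws : List Int) (T : Int)
    (hpw : ws.Pairwise (fun a b => a ≤ b)) :
    ∀ n lo hi, hi - lo = n →
      lo ≤ (ws.filter (fun w => decide (w ≤ T))).length →
      (ws.filter (fun w => decide (w ≤ T))).length ≤ hi →
      hi ≤ ws.length →
      weightMachineSearch ws T lo hi = (ws.filter (fun w => decide (w ≤ T))).length := by
  intro n
  induction n using Nat.strong_induction_on with
  | _ n ih =>
    intro lo hi hn hlo hhi hlen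
    rw [weightMachineSearch]
    by_cases h : lo < hi
    · simp only [h, if_true]
      have hmidlt : (lo + hi) / 2 < ws.length := by omega
      have hget : ws.getD ((lo + hi) / 2) 0 = ws[(lo + hi) / 2] := List.getD_eq_getElem ws 0 hmidlt
      rw [hget]
      by_cases hc : ws[(lo + hi) / 2] ≤ T
      · simp only [hc, if_true]
        have := filter_le_length_ge ws T hpw _ hmidlt hc
        exact ih (hi - ((lo + hi) / 2 + 1)) (by omega) _ _ rfl (by omega) hhi hlen
      · simp only [hc, if_false]
        have := filter_le_length_le ws T hpw _ hmidlt (by omega)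
        exact ih ((lo + hi) / 2 - lo) (by omega) _ _ rfl hlo (by omega) (by omega)
    · simp only [h, if_false]; omega

-- A's fold counts 1 per element plus 1 per element above T.
theorem weightMachine_foldl_shift (T acc : Int) (ws : List Int) :
    ws.foldl (fun t w => if w > T then t + 2 * 1 else t + 1) acc
      = acc + (ws.length : Int) + ((ws.filter (fun w => T < w)).length : Int) := by
  induction ws generalizing acc with
  | nil => simp
  | cons h t ih =>
    by_cases hc : h > T
    · rw [List.foldl_cons, if_pos hc, ih]
      simp [List.filter_cons, hc]; push_cast; ring
    · rw [List.foldl_cons, if_neg hc, ih]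
      simp [List.filter_cons, hc]; push_cast; ring

-- The two complementary filters partition the list.
theorem filter_partition (T : Int) (ws : List Int) :
    ((ws.filter (fun w => T < w)).length) + ((ws.filter (fun w => decide (w ≤ T))).length)
      = ws.length := by
  induction ws with
  | nil => simp
  | cons h t ih =>
    by_cases hc : T < h
    · have : ¬ h ≤ T := by omega
      simp [List.filter_cons, hc, this]; omega
    · have : h ≤ T := by omega
      simp [List.filter_cons, hc, this]; omega

-- ===== VERDICT =====
theorem weightMachine_spec : Claim_equal_weightMachine := by
  intro N weights T _
  unfold Spec_weightMachine weightMachine weightMachine_alt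
  simp only []
  set ws := PySem.List.sorted weights (fun x => x) false with hws
  have hperm : ws.Perm weights := PySem.List.sorted_perm weights (fun x => x) false
  have hpw : ws.Pairwise (fun a b => a ≤ b) := by
    simpa using PySem.List.sorted_pairwise (xs := weights) (key := fun x => x)
  have hcount : weightMachineSearch ws T 0 ws.length
      = (ws.filter (fun w => decide (w ≤ T))).length :=
    search_eq_count ws T hpw _ 0 ws.length rfl (Nat.zero_le _)
      (List.length_filter_le _ _) (le_refl _)
  have hfp : (weights.filter (fun w => T < w)).length = (ws.filter (fun w => T < w)).length :=
    ((hperm.filter _).length_eq).symm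
  have hpart := filter_partition T ws
  have hlenp : ws.length = weights.length := hperm.length_eq
  rw [weightMachine_foldl_shift, hcount, hfp]
  push_cast
  omega
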